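-- pv_equiv track=rewrite | github.com/nordquant/dbtlearn-snowflake-importer | test_integration.py | get_sql_commands
-- ===== SOURCE A (Python) =====
-- from collections import OrderedDict
--
-- def get_sql_commands(md, public_key=None):
--     """Extract SQL commands from markdown and optionally substitute public key."""
--     commands = OrderedDict()
--     current_section = None
--     in_named_sql = False
--     for l in md.split("\n"):
--         if in_named_sql:
--             if l.startswith("```"):
--                 in_named_sql = False
--             else:
--                 if l.strip() == "" or l.startswith("--"):
--                     continue
--                 # add command to current section
--                 if current_section not in commands:
--                     commands[current_section] = ""
--
--                 # Replace public key placeholder if present and public_key provided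
--                 placeholder = "<<Add Your Public Key File's content here>>"
--                 if public_key and placeholder in l:
--                     l = l.replace(placeholder, public_key)
--
--                 commands[current_section] += l + "\n"
--         elif l.startswith("```sql {#"):
--             in_named_sql = True
--             current_section = l.split("{#")[1].split("}")[0]
--     return {
--         k: [c.strip("\n") for c in v.split(";") if c.strip() != ""]
--         for k, v in commands.items()
--     }
-- ===== SOURCE B (Python) =====
-- def get_sql_commands(md, public_key=None):
--     """Extract SQL commands from markdown and optionally substitute public key."""
--     placeholder = "<<Add Your Public Key File's content here>>"
--     lines = md.split("\n")
--     n = len(lines)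
--     # Phase 1: extract each named block as (section_name, body_lines).
--     # A line starting with "```" (even another opener) terminates the body and
--     # is consumed; a block running to end-of-text keeps all remaining lines.
--     blocks = []
--     i = 0
--     while i < n:
--         l = lines[i]
--         if l.startswith("```sql {#"):
--             name = l.split("{#")[1].split("}")[0]
--             j = i + 1
--             body = []
--             while j < n and not lines[j].startswith("```"):
--                 body.append(lines[j])
--                 j += 1
--             blocks.append((name, body))
--             i = j + 1
--         else:
--             i += 1
--     # Phase 2: accumulate the kept lines per section name, in insertion order.
--     texts = {}
--     for name, body in blocks:
--         for l in body:
--             if l.strip() == "" or l.startswith("--"):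
--                 continue
--             if public_key and placeholder in l:
--                 l = l.replace(placeholder, public_key)
--             texts[name] = texts.get(name, "") + l + "\n"
--     return {
--         k: [c.strip("\n") for c in v.split(";") if c.strip() != ""]
--         for k, v in texts.items()
--     }
-- ===== Notes on version B (the rewrite author's own statement) =====
-- stated objective: alternative
-- what changed: Replaced A's single line-by-line state machine with an in_named_sql flag by a two-phase decomposition: first extract each named fenced block as (name, body-lines), then accumulate kept lines per section name into a dict, keeping the final split-on-';' comprehension.
import Mathlib
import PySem

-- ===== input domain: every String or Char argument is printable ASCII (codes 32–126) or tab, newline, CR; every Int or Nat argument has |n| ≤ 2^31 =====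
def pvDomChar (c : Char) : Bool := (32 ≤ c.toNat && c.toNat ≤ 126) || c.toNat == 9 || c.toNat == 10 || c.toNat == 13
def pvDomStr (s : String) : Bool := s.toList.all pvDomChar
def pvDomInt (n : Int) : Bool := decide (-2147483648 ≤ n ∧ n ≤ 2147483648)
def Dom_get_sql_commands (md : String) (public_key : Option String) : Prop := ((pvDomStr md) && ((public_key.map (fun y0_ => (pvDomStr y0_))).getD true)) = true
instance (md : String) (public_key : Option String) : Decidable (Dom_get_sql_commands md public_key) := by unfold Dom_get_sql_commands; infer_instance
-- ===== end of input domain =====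

-- B replaces A's single line-by-line loop with a mutable in_named_sql flag by a two-phase
-- decomposition (first extract whole named blocks, then accumulate kept lines per name);
-- objective: alternative decomposition, same cost. Equivalence of the RETURN values is proved.

-- Python '+' on str (exact: concatenation of code points)
def pvScat (a b : String) : String := String.ofList (a.toList ++ b.toList)

-- s.split(sep) for a nonempty literal sep (split? is some there; exact)
def pvSplit (s sep : String) : List String := (PySem.Str.split? s sep).getD []

def pvPlaceholder : String := "<<Add Your Public Key File's content here>>"

-- Python truthiness of an optional string ('if public_key')
def pvTruthy (pk : Option String) : Bool :=
  match pk with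
  | some s => s ≠ ""
  | none => false

-- ===== PORT A =====
-- body of A's 'else' arm for a kept content line: membership check, create-with-"", '+=' line + "\n"
def aAddLine (pk : Option String) (d : PySem.Dict String String) (sec l : String) :
    PySem.Dict String String :=
  let d := if d.contains sec then d else d.insert sec ""
  let l := if pvTruthy pk && PySem.Str.isIn pvPlaceholder l then
             PySem.Str.replace l pvPlaceholder (pk.getD "") else l
  d.insert sec (pvScat (pvScat (d.getD sec "") l) "\n")

-- A's for-loop over md.split("\n") carrying (commands, current_section, in_named_sql).
-- current_section starts as Python None but is only ever read after being set: we carry "" until then.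
def aLoop (pk : Option String) : List String → PySem.Dict String String → String → Bool →
    PySem.Dict String String
  | [], d, _, _ => d
  | l :: rest, d, sec, named =>
    if named then
      if PySem.Str.startswith l "```" then aLoop pk rest d sec false
      else if PySem.Str.strip l == "" || PySem.Str.startswith l "--" then aLoop pk rest d sec true
      else aLoop pk rest (aAddLine pk d sec l) sec true
    else if PySem.Str.startswith l "```sql {#" then
      -- l.split("{#")[1].split("}")[0]; index [1] exists since the line starts with "```sql {#"
      aLoop pk rest d ((pvSplit ((pvSplit l "{#").getD 1 "") "}").getD 0 "") true
    else aLoop pk rest d sec false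

-- the final dict comprehension's value: [c.strip("\n") for c in v.split(";") if c.strip() != ""]
def aPost (v : String) : List String :=
  ((pvSplit v ";").filter (fun c => PySem.Str.strip c != "")).map
    (fun c => PySem.Str.stripChars c "\n")

def get_sql_commands (md : String) (public_key : Option String) : List (String × List String) :=
  (aLoop public_key (pvSplit md "\n") PySem.Dict.empty "" false).items.map
    (fun kv => (kv.1, aPost kv.2))

-- ===== PORT B =====
def bFence (l : String) : Bool := PySem.Str.startswith l "```"

-- Phase 1 (Source B's outer while): each opener yields (name, body up to the next "```" line,
-- that closer consumed: i = j + 1); a block running to end-of-text keeps all remaining lines.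
def bBlocks : List String → List (String × List String)
  | [] => []
  | l :: rest =>
    if PySem.Str.startswith l "```sql {#" then
      ((pvSplit ((pvSplit l "{#").getD 1 "") "}").getD 0 "",
        rest.takeWhile (fun x => !bFence x)) ::
      bBlocks ((rest.dropWhile (fun x => !bFence x)).drop 1)
    else bBlocks rest
  termination_by xs => xs.length
  decreasing_by
  · have h1 := List.length_dropWhile_le (fun x => !bFence x) rest
    simp_all; omega
  · simp

-- Phase 2 inner loop: accumulate one block's kept lines into texts
def bBody (pk : Option String) (name : String) (body : List String)
    (t : PySem.Dict String String) : PySem.Dict String String :=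
  body.foldl (fun t l =>
    if PySem.Str.strip l == "" || PySem.Str.startswith l "--" then t
    else
      let l := if pvTruthy pk && PySem.Str.isIn pvPlaceholder l then
                 PySem.Str.replace l pvPlaceholder (pk.getD "") else l
      t.insert name (pvScat (pvScat (t.getD name "") l) "\n")) t

def bPost (v : String) : List String :=
  ((pvSplit v ";").filter (fun c => PySem.Str.strip c != "")).map
    (fun c => PySem.Str.stripChars c "\n")

def get_sql_commands_alt (md : String) (public_key : Option String) :
    List (String × List String) :=
  ((bBlocks (pvSplit md "\n")).foldl
      (fun t b => bBody public_key b.1 b.2 t) PySem.Dict.empty).items.map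
    (fun kv => (kv.1, bPost kv.2))

-- ===== PRECONDITION & SPEC =====
def Spec_get_sql_commands (md : String) (public_key : Option String) (out : List (String × List String)) : Prop := out = get_sql_commands_alt md public_key
instance (md : String) (public_key : Option String) (out : List (String × List String)) : Decidable (Spec_get_sql_commands md public_key out) := by unfold Spec_get_sql_commands; infer_instance

-- ===== CLAIM (what is proved, stated in full; the proofs are below) =====
def Claim_equal_get_sql_commands : Prop := ∀ (md : String) (public_key : Option String), Dom_get_sql_commands md public_key → Spec_get_sql_commands md public_key (get_sql_commands md public_key)

-- ===== LEMMAS AND PROOFS =====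

-- A's create-then-append equals B's single get-default insert
theorem aAddLine_eq (pk : Option String) (d : PySem.Dict String String) (sec l : String) :
    aAddLine pk d sec l =
      d.insert sec (pvScat (pvScat (d.getD sec "") (if pvTruthy pk && PySem.Str.isIn pvPlaceholder l then
        PySem.Str.replace l pvPlaceholder (pk.getD "") else l)) "\n") := by
  unfold aAddLine
  by_cases h : d.contains sec = true
  · simp [h]
  · simp only [Bool.not_eq_true] at h
    simp [h, PySem.Dict.insert_insert_self, PySem.Dict.getD_of_not_contains d "" h]

-- in the named state, A processes the body lines with B's step, then resumes after the closer
theorem aLoop_true (pk : Option String) (lines : List String)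
    (d : PySem.Dict String String) (sec : String) :
    aLoop pk lines d sec true =
      aLoop pk ((lines.dropWhile (fun x => !bFence x)).drop 1)
        (bBody pk sec (lines.takeWhile (fun x => !bFence x)) d) sec false := by
  induction lines generalizing d with
  | nil => simp [aLoop, bBody]
  | cons l rest ih =>
    by_cases hf : bFence l = true
    · simp [aLoop, bFence] at hf ⊢
      simp [hf, bBody, List.takeWhile, List.dropWhile]
    · simp [bFence] at hf
      by_cases hs : (PySem.Str.strip l = "" ∨ PySem.Chars.startswith l.toList ['-', '-'] = true)
      · simp [aLoop, hf, hs, List.takeWhile, List.dropWhile, bFence, ih, bBody]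
      · simp [aLoop, hf, hs, List.takeWhile, List.dropWhile, bFence, ih, bBody, aAddLine_eq]

-- in the base state, A's loop is B's fold over the extracted blocks
theorem aLoop_false (pk : Option String) : ∀ (n : Nat) (lines : List String),
    lines.length ≤ n → ∀ (d : PySem.Dict String String) (sec : String),
    aLoop pk lines d sec false =
      (bBlocks lines).foldl (fun t b => bBody pk b.1 b.2 t) d := by
  intro n
  induction n with
  | zero =>
    intro lines h d sec
    have : lines = [] := List.eq_nil_of_length_eq_zero (Nat.le_zero.mp h)
    simp [this, aLoop, bBlocks]
  | succ n ih =>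
    intro lines h d sec
    match lines with
    | [] => simp [aLoop, bBlocks]
    | l :: rest =>
      simp only [List.length_cons, Nat.succ_le_succ_iff] at h
      by_cases ho : PySem.Str.startswith l "```sql {#" = true
      · rw [bBlocks]
        simp only [ho, if_pos, List.foldl_cons]
        rw [aLoop]
        simp only [if_neg (Bool.false_ne_true), ho, if_pos]
        rw [aLoop_true]
        apply ih
        have h1 := List.length_dropWhile_le (fun x => !bFence x) rest
        have h2 : ((rest.dropWhile (fun x => !bFence x)).drop 1).length
            = (rest.dropWhile (fun x => !bFence x)).length - 1 := List.length_drop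
        omega
      · rw [bBlocks]
        simp only [ho, if_neg, Bool.false_eq_true, not_false_iff]
        rw [aLoop]
        simp only [ho, if_neg, Bool.false_eq_true, not_false_iff]
        exact ih rest h d sec

-- ===== VERDICT (by name: the statement is the Claim_ definition above) =====
theorem get_sql_commands_spec : Claim_equal_get_sql_commands := by
  intro md pk _
  unfold Spec_get_sql_commands get_sql_commands get_sql_commands_alt
  rw [aLoop_false pk (pvSplit md "\n").length _ (Nat.le_refl _)]
  rfl
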